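-- pv_equiv track=rewrite | github.com/algo-test-study/coding-test-study | Week05/1126_PGS_뉴스클러스터링_정성인.py | get_multiset
-- ===== SOURCE A (Python) =====
-- def get_multiset(str1):
--     multiset = dict()
--     str1 = str1.lower()
--
--     for i in range(len(str1)-1):
--         word = ''.join(str1[i:i+2])
--         if word.isalpha():
--             multiset[word] = multiset.get(word, 0) + 1
--     return multiset
-- ===== SOURCE B (Python) =====
-- def _add_pairs(run, multiset):
--     for a, b in zip(run, run[1:]):
--         pair = a + b
--         multiset[pair] = multiset.get(pair, 0) + 1
--
--
-- def get_multiset(str1):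
--     # Tokenize the lowercased string into maximal alphabetic runs,
--     # then count the adjacent 2-grams of each run.
--     multiset = dict()
--     run = ''
--     for c in str1.lower():
--         if c.isalpha():
--             run += c
--         else:
--             _add_pairs(run, multiset)
--             run = ''
--     _add_pairs(run, multiset)
--     return multiset
-- ===== Notes on version B (the rewrite author's own statement) =====
-- stated objective: faster
-- what changed: B tokenizes the lowercased string into maximal alphabetic runs and counts each run's adjacent character pairs, instead of slicing out and isalpha-testing every length-2 window of the whole string; this avoids a 2-char string slice + join + str.isalpha call per position (one cheap per-char isalpha instead).
import Mathlib
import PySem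

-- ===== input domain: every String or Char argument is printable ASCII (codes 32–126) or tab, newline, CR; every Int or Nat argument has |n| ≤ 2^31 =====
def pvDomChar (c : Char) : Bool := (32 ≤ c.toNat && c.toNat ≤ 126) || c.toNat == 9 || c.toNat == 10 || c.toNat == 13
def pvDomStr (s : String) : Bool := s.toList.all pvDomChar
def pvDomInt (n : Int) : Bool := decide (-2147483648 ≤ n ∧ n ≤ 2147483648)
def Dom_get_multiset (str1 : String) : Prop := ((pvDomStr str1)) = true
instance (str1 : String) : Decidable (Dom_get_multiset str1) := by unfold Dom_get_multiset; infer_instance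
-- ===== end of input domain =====

-- B tokenizes the lowercased string into maximal alphabetic runs and counts each run's adjacent
-- character pairs, instead of slicing out and isalpha-testing every length-2 window (objective:
-- faster by a constant factor, measured; same O(n) asymptotics).


-- ===== PORT A =====
-- ''.join(str1[i:i+2]) of a str slice is that slice itself, so word is the slice.
def get_multiset (str1 : String) : List (String × Int) :=
  let s := PySem.Str.lower str1
  ((PySem.List.pyRange 0 (PySem.Str.len s - 1) 1).foldl
    (fun (multiset : PySem.Dict String Int) i =>
      let word := PySem.Str.slice s (some i) (some (i + 2))
      if PySem.Str.strIsalpha word then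
        multiset.insert word (multiset.getD word 0 + 1)
      else multiset) PySem.Dict.empty).items

-- ===== PORT B =====
-- _add_pairs: 'for a, b in zip(run, run[1:]): pair = a + b; multiset[pair] = multiset.get(pair, 0) + 1'
-- (the run is kept as its list of characters; 'a + b' on two 1-char strings is String.ofList [a, b])
def addPairs (run : List Char) (multiset : PySem.Dict String Int) : PySem.Dict String Int :=
  (run.zip run.tail).foldl
    (fun m p =>
      let pair := String.ofList [p.1, p.2]
      m.insert pair (m.getD pair 0 + 1)) multiset

def get_multiset_alt (str1 : String) : List (String × Int) :=
  let st := (PySem.Str.lower str1).toList.foldl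
    (fun (st : List Char × PySem.Dict String Int) c =>
      if PySem.Chars.isalpha c then (st.1 ++ [c], st.2)
      else ([], addPairs st.1 st.2)) ([], PySem.Dict.empty)
  (addPairs st.1 st.2).items

-- ===== PRECONDITION & SPEC =====
def Spec_get_multiset (str1 : String) (out : List (String × Int)) : Prop := out = get_multiset_alt str1
instance (str1 : String) (out : List (String × Int)) : Decidable (Spec_get_multiset str1 out) := by unfold Spec_get_multiset; infer_instance

-- ===== CLAIM (what is proved, stated in full; the proofs are below) =====
def Claim_equal_get_multiset : Prop := ∀ (str1 : String), Dom_get_multiset str1 → Spec_get_multiset str1 (get_multiset str1)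

-- ===== LEMMAS AND PROOFS =====

-- proof-only vocabulary
def mkpair (p : Char × Char) : String := String.ofList [p.1, p.2]
def ins (m : PySem.Dict String Int) (w : String) : PySem.Dict String Int :=
  m.insert w (m.getD w 0 + 1)
def adj (xs : List Char) : List (Char × Char) := xs.zip xs.tail
def qal (p : Char × Char) : Bool := PySem.Chars.isalpha p.1 && PySem.Chars.isalpha p.2
def pairStrs (r : List Char) : List String := (adj r).map mkpair
def fwins (cs : List Char) : List String := ((adj cs).filter qal).map mkpair
def emitAll : List Char → List Char → List String
  | run, [] => pairStrs run
  | run, c :: cs =>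
      if PySem.Chars.isalpha c then emitAll (run ++ [c]) cs
      else pairStrs run ++ emitAll [] cs

theorem addPairs_eq (run : List Char) (d : PySem.Dict String Int) :
    addPairs run d = (pairStrs run).foldl ins d := by
  simp [addPairs, pairStrs, ins, mkpair, adj, List.foldl_map]

theorem adj_cons_cons (a b : Char) (t : List Char) :
    adj (a :: b :: t) = (a, b) :: adj (b :: t) := by
  simp [adj]

theorem filter_adj_of_alpha (run : List Char) (h : ∀ c ∈ run, PySem.Chars.isalpha c) :
    (adj run).filter qal = adj run := by
  apply List.filter_eq_self.2
  intro p hp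
  have hmem := List.of_mem_zip hp
  have h2 : p.2 ∈ run := List.mem_of_mem_tail hmem.2
  simp [qal, h p.1 hmem.1, h p.2 h2]

theorem adj_append_cons (xs : List Char) (c : Char) (ys : List Char) :
    adj (xs ++ c :: ys) =
      adj xs ++ (match xs.getLast? with | some a => [(a, c)] | none => []) ++ adj (c :: ys) := by
  induction xs with
  | nil => simp [adj]
  | cons x t ih =>
      cases t with
      | nil => simp [adj]
      | cons y t' =>
          simp only [List.cons_append] at ih ⊢
          rw [adj_cons_cons, ih, adj_cons_cons]
          simp [List.getLast?_cons_cons]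

theorem emitAll_eq_fwins (cs : List Char) :
    ∀ run, (∀ c ∈ run, PySem.Chars.isalpha c) → emitAll run cs = fwins (run ++ cs) := by
  induction cs with
  | nil =>
      intro run h
      simp [emitAll, fwins, pairStrs, filter_adj_of_alpha run h]
  | cons c cs ih =>
      intro run h
      by_cases hc : PySem.Chars.isalpha c = true
      · have h' : ∀ x ∈ run ++ [c], PySem.Chars.isalpha x := by
          intro x hx
          rcases List.mem_append.1 hx with hx | hx
          · exact h x hx
          · simp at hx; simpa [hx]
        have := ih (run ++ [c]) h'
        simp only [emitAll, hc, if_true, this, List.append_assoc, List.singleton_append]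
      · have hc' : PySem.Chars.isalpha c = false := by simpa using hc
        have hrec := ih [] (by intro x hx; simp at hx)
        simp only [List.nil_append] at hrec
        have htailfw : (adj (c :: cs)).filter qal = (adj cs).filter qal := by
          cases cs with
          | nil => simp [adj]
          | cons y t => rw [adj_cons_cons]; simp [qal, hc']
        have hbound : ((match run.getLast? with | some a => [(a, c)] | none => []) : List (Char × Char)).filter qal = [] := by
          cases hg : run.getLast? with
          | none => rfl
          | some a => simp [qal, hc']
        simp only [emitAll, hc', Bool.false_eq_true, if_false, hrec]
        simp only [fwins, adj_append_cons run c cs, List.filter_append, hbound,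
          filter_adj_of_alpha run h, htailfw, List.map_append, List.append_nil, pairStrs]

theorem foldB_eq (cs : List Char) :
    ∀ run d,
      (let st := cs.foldl
          (fun (st : List Char × PySem.Dict String Int) c =>
            if PySem.Chars.isalpha c then (st.1 ++ [c], st.2)
            else ([], addPairs st.1 st.2)) (run, d)
       addPairs st.1 st.2) = (emitAll run cs).foldl ins d := by
  induction cs with
  | nil => intro run d; simp [emitAll, addPairs_eq]
  | cons c cs ih =>
      intro run d
      by_cases hc : PySem.Chars.isalpha c = true
      · simp only [List.foldl_cons, hc, if_true, emitAll]
        exact ih (run ++ [c]) d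
      · have hc' : PySem.Chars.isalpha c = false := by simpa using hc
        simp only [List.foldl_cons, hc', if_false, emitAll, Bool.false_eq_true, List.foldl_append]
        rw [ih [] (addPairs run d), addPairs_eq]

theorem altSide (str1 : String) :
    get_multiset_alt str1 = ((fwins (PySem.Str.lower str1).toList).foldl ins PySem.Dict.empty).items := by
  have h := foldB_eq (PySem.Str.lower str1).toList [] PySem.Dict.empty
  have h2 := emitAll_eq_fwins (PySem.Str.lower str1).toList [] (by intro x hx; simp at hx)
  simp only [List.nil_append] at h2
  simp only [get_multiset_alt]
  rw [h, h2]

theorem take_two_drop (cs : List Char) (k : Nat) (hk : k + 1 < cs.length) :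
    (cs.drop k).take 2 = [cs[k], cs[k + 1]] := by
  rw [List.drop_eq_getElem_cons (i := k) (by omega)]
  rw [List.drop_eq_getElem_cons (i := k + 1) hk]
  rfl

theorem windows_eq (cs : List Char) :
    (PySem.List.pyRange 0 ((cs.length : Int) - 1) 1).map
        (fun i => PySem.List.slice cs (some i) (some (i + 2)))
      = (adj cs).map (fun p => [p.1, p.2]) := by
  apply List.ext_getElem
  · simp [PySem.List.length_pyRange_one, adj, List.length_zip, List.length_tail]
  · intro k h1 h2
    have hk : k + 1 < cs.length := by
      simp [PySem.List.length_pyRange_one] at h1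
      omega
    rw [List.getElem_map, List.getElem_map, PySem.List.getElem_pyRange_one]
    have hi : (0 : Int) + (k : Int) = ((k : Nat) : Int) := by ring
    have hi2 : ((k : Nat) : Int) + 2 = ((k : Nat) : Int) + ((2 : Nat) : Int) := by ring
    rw [hi, hi2, PySem.List.slice_natCast_add, take_two_drop cs k hk]
    simp [adj, List.getElem_zip, List.getElem_tail]

theorem strIsalpha_mkpair (p : Char × Char) :
    PySem.Str.strIsalpha (mkpair p) = qal p := by
  simp [mkpair, qal, PySem.Str.strIsalpha_eq, PySem.Chars.strIsalpha]

theorem aSide (str1 : String) :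
    get_multiset str1 = ((fwins (PySem.Str.lower str1).toList).foldl ins PySem.Dict.empty).items := by
  simp only [get_multiset]
  set s := PySem.Str.lower str1 with hs
  have h1 : (PySem.List.pyRange 0 (PySem.Str.len s - 1) 1).foldl
      (fun (multiset : PySem.Dict String Int) i =>
        let word := PySem.Str.slice s (some i) (some (i + 2))
        if PySem.Str.strIsalpha word then
          multiset.insert word (multiset.getD word 0 + 1)
        else multiset) PySem.Dict.empty
      = ((PySem.List.pyRange 0 ((s.toList.length : Int) - 1) 1).map
          (fun i => PySem.List.slice s.toList (some i) (some (i + 2)))).foldl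
          (fun m w => if PySem.Str.strIsalpha (String.ofList w) then ins m (String.ofList w) else m)
          PySem.Dict.empty := by
    rw [List.foldl_map]
    have hlen : PySem.Str.len s = ((s.toList.length : Int)) := by simp
    rw [hlen]
    apply PySem.List.foldl_congr_mem
    intro acc i _
    have hw : PySem.Str.slice s (some i) (some (i + 2))
        = String.ofList (PySem.List.slice s.toList (some i) (some (i + 2))) := by
      apply String.toList_injective
      simp [PySem.Str.toList_slice]
    rw [hw]
    rfl
  rw [h1, windows_eq s.toList, List.foldl_map]
  rw [PySem.List.foldl_congr_mem _ _ (fun m p => if qal p then ins m (mkpair p) else m) _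
    (by intro acc p _
        show (if PySem.Str.strIsalpha (String.ofList [p.1, p.2]) then _ else _) = _
        rw [show String.ofList [p.1, p.2] = mkpair p from rfl, strIsalpha_mkpair])]
  rw [PySem.List.foldl_if_eq_foldl_filter qal (fun m p => ins m (mkpair p))]
  simp only [fwins, List.foldl_map]

-- ===== VERDICT (by name: the statement is the Claim_ definition above) =====
theorem get_multiset_spec : Claim_equal_get_multiset := by
  intro str1 _
  unfold Spec_get_multiset
  rw [aSide, altSide]
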